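-- pv_equiv track=rewrite | github.com/KelseyKwon/backjoon-programmers | 프로그래머스/2/138476. 귤 고르기/귤 고르기.py | solution
-- ===== SOURCE A (Python) =====
-- from collections import defaultdict
--
-- def solution(k, tangerine):
--     answer = 0
--     info = defaultdict(int)
--
--     #dict 생성
--     for i in tangerine:
--         info[i] += 1
--     # 딕셔너리는 .sort()의 메서드를 갖고 있지 않다.
--     # info.sort(key= lambda x: info[x], reverse = True)
--     counts = sorted(info.values(), reverse = True)
--
--     # for key in info.keys():
--     #     temp = info[key]
--     #     if k >= temp:
--     #         k -= temp
--     #         answer += 1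
--     #         continue
--     #     elif k>0 and k< emp:
--     #         answer += 1
--     #         break
--     #     elif k == 0:
--     #         break
--     # 이렇게 세가지로 경우를 쪼개는 것보다 그냥 k > temp이면 무조건 1 더하고,
--     # k <= temp이면 1더하고 break하는게 더 나음.
--     for c in counts:
--         if k > c:
--             k -= c
--             answer += 1
--         else:
--             answer += 1
--             break
--     return answer
-- ===== SOURCE B (Python) =====
-- from collections import Counter
--
-- def solution(k, tangerine):
--     # Bucket (counting-sort) sweep: no comparison sort. buckets[c] = how many
--     # distinct sizes occur exactly c times; sweep c from the largest count down,
--     # taking whole buckets greedily, returning as soon as k is covered.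
--     freq = Counter(tangerine)
--     buckets = Counter(freq.values())
--     answer = 0
--     c = max(buckets, default=0)
--     while c >= 1:
--         for _ in range(buckets.get(c, 0)):
--             answer += 1
--             if k <= c:
--                 return answer
--             k -= c
--         c -= 1
--     return answer
-- ===== Notes on version B (the rewrite author's own statement) =====
-- stated objective: alternative
-- what changed: Replaces the comparison sort of the counts plus greedy decrement loop by a counting-sort bucket sweep: a count-of-counts table is built and swept from the largest count value downward, taking whole buckets and returning early once k is covered.
import Mathlib
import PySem

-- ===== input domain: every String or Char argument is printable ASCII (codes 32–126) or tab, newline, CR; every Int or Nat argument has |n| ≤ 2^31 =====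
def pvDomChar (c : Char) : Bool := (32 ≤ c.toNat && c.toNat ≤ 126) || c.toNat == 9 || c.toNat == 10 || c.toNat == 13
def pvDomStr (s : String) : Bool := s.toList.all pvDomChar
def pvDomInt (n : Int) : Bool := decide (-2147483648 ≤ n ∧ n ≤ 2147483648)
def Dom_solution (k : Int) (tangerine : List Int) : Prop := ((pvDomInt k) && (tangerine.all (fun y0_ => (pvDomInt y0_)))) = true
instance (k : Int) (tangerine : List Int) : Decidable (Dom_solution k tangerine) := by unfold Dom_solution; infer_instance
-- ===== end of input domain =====

-- B replaces A's comparison sort of the counts + greedy decrement loop by a count-of-counts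
-- bucket sweep from the largest count value downward (objective: alternative).


-- ===== PORT A =====
-- 'for c in counts: if k > c: k -= c; answer += 1 else: answer += 1; break'
def solutionLoopA (k : Int) (answer : Int) : List Int → Int
  | [] => answer
  | c :: rest => if k > c then solutionLoopA (k - c) (answer + 1) rest else answer + 1

def solution (k : Int) (tangerine : List Int) : Int :=
  -- info = defaultdict(int); for i in tangerine: info[i] += 1
  let info : PySem.Dict Int Int := tangerine.foldl (fun d i => d.modify i 0 (· + 1)) PySem.Dict.empty
  -- counts = sorted(info.values(), reverse=True)
  let counts := PySem.List.sorted info.values (fun x => x) true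
  solutionLoopA k 0 counts

-- ===== PORT B =====
-- inner 'for _ in range(buckets.get(c, 0)): answer += 1; if k <= c: return answer; k -= c'
-- (.inr = early return with the answer, .inl = fall through with updated (k, answer))
def solutionInnerB (c k answer : Int) : Nat → (Int × Int) ⊕ Int
  | 0 => Sum.inl (k, answer)
  | m + 1 =>
    if k ≤ c then Sum.inr (answer + 1) else solutionInnerB c (k - c) (answer + 1) m

-- 'while c >= 1: …; c -= 1' — fuel is the current value of c (counts are positive ints)
def solutionSweepB (buckets : PySem.Dict Int Int) (k answer : Int) : Nat → Int
  | 0 => answer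
  | c + 1 =>
    match solutionInnerB ((c : Int) + 1) k answer (buckets.getD ((c : Int) + 1) 0).toNat with
    | Sum.inr a => a
    | Sum.inl (k', a') => solutionSweepB buckets k' a' c

def solution_alt (k : Int) (tangerine : List Int) : Int :=
  -- freq = Counter(tangerine); buckets = Counter(freq.values())
  let freq : PySem.Dict Int Int := PySem.Dict.counter tangerine
  let buckets : PySem.Dict Int Int := PySem.Dict.counter freq.values
  -- c = max(buckets, default=0)
  let cmax : Int := PySem.List.maxD buckets.keys (fun x => x) 0
  solutionSweepB buckets k 0 cmax.toNat

-- ===== PRECONDITION & SPEC =====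
def Spec_solution (k : Int) (tangerine : List Int) (out : Int) : Prop := out = solution_alt k tangerine
instance (k : Int) (tangerine : List Int) (out : Int) : Decidable (Spec_solution k tangerine out) := by unfold Spec_solution; infer_instance

-- ===== CLAIM (what is proved, stated in full; the proofs are below) =====
def Claim_equal_solution : Prop := ∀ (k : Int) (tangerine : List Int), Dom_solution k tangerine → Spec_solution k tangerine (solution k tangerine)

-- ===== LEMMAS AND PROOFS =====

-- the multiset of counts, laid out descending bucket by bucket: for c = f, f-1, …, 1
-- emit (buckets.getD c 0) copies of c
def descList (buckets : PySem.Dict Int Int) : Nat → List Int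
  | 0 => []
  | c + 1 => List.replicate (buckets.getD ((c : Int) + 1) 0).toNat ((c : Int) + 1) ++ descList buckets c

theorem loopA_replicate (c : Int) : ∀ (m : Nat) (k a : Int) (rest : List Int),
    solutionLoopA k a (List.replicate m c ++ rest) =
      (match solutionInnerB c k a m with
       | Sum.inr r => r
       | Sum.inl (k', a') => solutionLoopA k' a' rest) := by
  intro m
  induction m with
  | zero => intro k a rest; rfl
  | succ n ih =>
      intro k a rest
      simp only [List.replicate_succ, List.cons_append, solutionLoopA, solutionInnerB]
      by_cases h : k ≤ c
      · have : ¬ k > c := by omega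
        simp [this, h]
      · have : k > c := by omega
        simp [this, h, ih]

theorem loopA_descList (buckets : PySem.Dict Int Int) : ∀ (f : Nat) (k a : Int),
    solutionLoopA k a (descList buckets f) = solutionSweepB buckets k a f := by
  intro f
  induction f with
  | zero => intro k a; rfl
  | succ c ih =>
      intro k a
      simp only [descList, solutionSweepB, loopA_replicate]
      cases solutionInnerB ((c : Int) + 1) k a (buckets.getD ((c : Int) + 1) 0).toNat with
      | inr r => rfl
      | inl p => cases p with | mk k' a' => exact ih k' a'

theorem count_descList (buckets : PySem.Dict Int Int) : ∀ (f : Nat) (x : Int),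
    (descList buckets f).count x =
      if 1 ≤ x ∧ x ≤ (f : Int) then (buckets.getD x 0).toNat else 0 := by
  intro f
  induction f with
  | zero => intro x; simp [descList]; omega
  | succ c ih =>
      intro x
      simp only [descList, List.count_append, List.count_replicate, ih]
      by_cases hx : x = (c : Int) + 1
      · subst hx
        have h1 : ¬ ((c : Int) + 1 ≤ (c : Int)) := by omega
        have h2 : (1 : Int) ≤ (c : Int) + 1 ∧ (c : Int) + 1 ≤ ((c + 1 : Nat) : Int) := by
          constructor <;> [omega; (push_cast; omega)]
        simp [h1, h2]
      · have hne : ¬ (((c : Int) + 1) == x) = true := by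
          simp only [beq_iff_eq]; omega
        have hiff : (1 ≤ x ∧ x ≤ (c : Int)) ↔ (1 ≤ x ∧ x ≤ ((c + 1 : Nat) : Int)) := by
          push_cast; omega
        simp [hne, hiff]

theorem perm_descList (vs : List Int) (f : Nat)
    (hb : ∀ v ∈ vs, 1 ≤ v ∧ v ≤ (f : Int)) :
    vs.Perm (descList (PySem.Dict.counter vs) f) := by
  rw [List.perm_iff_count]
  intro x
  rw [count_descList]
  by_cases hx : 1 ≤ x ∧ x ≤ (f : Int)
  · rw [if_pos hx, PySem.Dict.getD_counter]
    simp
  · simp only [hx, if_false]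
    rw [List.count_eq_zero]
    intro hmem
    exact hx (hb x hmem)

theorem descList_bounds_pairwise (buckets : PySem.Dict Int Int) : ∀ (f : Nat),
    (∀ x ∈ descList buckets f, 1 ≤ x ∧ x ≤ (f : Int)) ∧
      (descList buckets f).Pairwise (fun a b => b ≤ a) := by
  intro f
  induction f with
  | zero => exact ⟨by simp [descList], by simp [descList]⟩
  | succ c ih =>
      obtain ⟨ihb, ihp⟩ := ih
      constructor
      · intro x hx
        simp only [descList, List.mem_append, List.mem_replicate] at hx
        rcases hx with ⟨-, rfl⟩ | hx
        · constructor <;> [omega; (push_cast; omega)]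
        · have := ihb x hx
          constructor <;> [omega; (push_cast at this ⊢; omega)]
      · rw [descList, List.pairwise_append]
        refine ⟨List.pairwise_replicate.mpr (by simp), ihp, ?_⟩
        intro a ha b hb
        rw [List.mem_replicate] at ha
        have := (ihb b hb).2
        omega

theorem sorted_rev_eq_descList (vs : List Int) (f : Nat)
    (hb : ∀ v ∈ vs, 1 ≤ v ∧ v ≤ (f : Int)) :
    PySem.List.sorted vs (fun x => x) true = descList (PySem.Dict.counter vs) f := by
  obtain ⟨_, hpair⟩ := descList_bounds_pairwise (PySem.Dict.counter vs) f
  apply PySem.List.eq_of_perm_of_pairwise_le_of_injective (key := fun x : Int => -x)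
    (fun a b h => by simpa using neg_injective h)
  · exact (PySem.List.sorted_perm vs (fun x => x) true).trans (perm_descList vs f hb)
  · have := PySem.List.sorted_pairwise_rev (xs := vs) (key := fun x : Int => x)
    exact this.imp (fun h => by simpa using h)
  · exact hpair.imp (fun h => by simpa using h)

theorem maxD_isMax_int (xs : List Int) (d y : Int) (hy : y ∈ xs) :
    y ≤ PySem.List.maxD xs (fun x => x) d := by
  have hdef : PySem.List.maxD xs (fun x => x) d = (PySem.List.max? xs (fun x => x)).getD d := rfl
  rw [hdef]
  cases h : PySem.List.max? xs (fun x => x) with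
  | none => rw [PySem.List.max?_eq_none_iff] at h; subst h; cases hy
  | some m => simpa using PySem.List.max?_isMax h y hy

theorem counter_values_pos (xs : List Int) :
    ∀ v ∈ (PySem.Dict.counter xs).values, 1 ≤ v := by
  intro v hv
  rw [PySem.Dict.values_eq_map_keys _ (PySem.Dict.nodup_keys_counter xs) 0] at hv
  obtain ⟨key, hkey, rfl⟩ := List.mem_map.mp hv
  rw [PySem.Dict.keys_counter, PySem.Set.mem_ofList] at hkey
  rw [PySem.Dict.getD_counter]
  have := List.count_pos_iff.mpr hkey
  omega

-- ===== VERDICT (by name: the statement is the Claim_ definition above) =====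
theorem solution_spec : Claim_equal_solution := by
  intro k tangerine _
  unfold Spec_solution solution solution_alt
  -- the foldl building 'info' is definitionally PySem.Dict.counter (counter_eq_foldl)
  show solutionLoopA k 0 (PySem.List.sorted (PySem.Dict.counter tangerine).values (fun x => x) true)
      = solutionSweepB (PySem.Dict.counter (PySem.Dict.counter tangerine).values) k 0
          (PySem.List.maxD (PySem.Dict.counter (PySem.Dict.counter tangerine).values).keys (fun x => x) 0).toNat
  set vs := (PySem.Dict.counter tangerine).values with hvs
  set buckets := PySem.Dict.counter vs with hbk
  set cmax := PySem.List.maxD buckets.keys (fun x => x) 0 with hcm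
  have hb : ∀ v ∈ vs, 1 ≤ v ∧ v ≤ ((cmax.toNat : Nat) : Int) := by
    intro v hv
    have h1 : 1 ≤ v := counter_values_pos tangerine v hv
    have hkey : v ∈ buckets.keys := by
      rw [hbk, PySem.Dict.keys_counter, PySem.Set.mem_ofList]; exact hv
    have h2 : v ≤ cmax := maxD_isMax_int buckets.keys 0 v hkey
    exact ⟨h1, by omega⟩
  rw [sorted_rev_eq_descList vs cmax.toNat hb, loopA_descList]
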